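-- pv_equiv track=rewrite | github.com/Alwaysproblem/simplecode | practice/NmaxMultiply.py | Top2Number
-- ===== SOURCE A (Python) =====
-- def Top2Number(b, mode):
--     b = b.copy()
--     if mode == 'max':
--         if all([i < 0 for i in b]):
--             top1 = min(b)
--             b.remove(top1)
--             top2 = min(b)
--         else:
--             top1 = max(b)
--             b.remove(top1)
--             top2 = max(b)
--     elif mode == 'min':
--         if all([i < 0 for i in b]):
--             top1 = max(b)
--             b.remove(top1)
--             top2 = max(b)
--         else:
--             top1 = min(b)
--             b.remove(top1)
--             top2 = min(b)
--
--     return top1, top2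
-- ===== SOURCE B (Python) =====
-- def Top2Number(b, mode):
--     if mode == 'max':
--         if all(i < 0 for i in b):
--             top1, top2 = sorted(b)[:2]
--         else:
--             top1, top2 = sorted(b, reverse=True)[:2]
--     elif mode == 'min':
--         if all(i < 0 for i in b):
--             top1, top2 = sorted(b, reverse=True)[:2]
--         else:
--             top1, top2 = sorted(b)[:2]
--     return top1, top2
-- ===== Notes on version B (the rewrite author's own statement) =====
-- stated objective: simpler
-- what changed: each branch's min/max-remove-min/max sequence is replaced by a single sort in the branch's direction, unpacking the first two sorted elements
import Mathlib
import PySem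

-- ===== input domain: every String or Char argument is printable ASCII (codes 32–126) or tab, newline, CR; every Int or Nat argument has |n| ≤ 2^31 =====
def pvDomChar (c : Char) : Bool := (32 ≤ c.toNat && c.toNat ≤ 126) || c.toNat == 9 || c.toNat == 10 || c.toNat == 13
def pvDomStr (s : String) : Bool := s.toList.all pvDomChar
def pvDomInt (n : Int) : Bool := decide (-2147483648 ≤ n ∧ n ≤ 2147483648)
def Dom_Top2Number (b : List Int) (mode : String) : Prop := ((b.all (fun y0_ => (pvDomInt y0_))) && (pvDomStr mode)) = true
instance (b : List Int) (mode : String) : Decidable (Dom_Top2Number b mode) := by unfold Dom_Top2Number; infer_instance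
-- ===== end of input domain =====

-- B replaces each branch's min/remove/min (resp. max/remove/max) pass with one sort, taking the first two sorted elements (objective: simpler).

-- ===== PORT A =====
-- getD fallbacks mark where Python raises (ValueError on min/max of empty, on remove);
-- those inputs, and modes other than 'max'/'min' (UnboundLocalError), are outside Pre_.
def Top2Number (b : List Int) (mode : String) : Int × Int :=
  if mode == "max" then
    if b.all (fun i => decide (i < 0)) then
      let top1 := (PySem.List.min? b (fun x => x)).getD 0
      let b' := (PySem.List.remove? b top1).getD []
      let top2 := (PySem.List.min? b' (fun x => x)).getD 0
      (top1, top2)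
    else
      let top1 := (PySem.List.max? b (fun x => x)).getD 0
      let b' := (PySem.List.remove? b top1).getD []
      let top2 := (PySem.List.max? b' (fun x => x)).getD 0
      (top1, top2)
  else if mode == "min" then
    if b.all (fun i => decide (i < 0)) then
      let top1 := (PySem.List.max? b (fun x => x)).getD 0
      let b' := (PySem.List.remove? b top1).getD []
      let top2 := (PySem.List.max? b' (fun x => x)).getD 0
      (top1, top2)
    else
      let top1 := (PySem.List.min? b (fun x => x)).getD 0
      let b' := (PySem.List.remove? b top1).getD []
      let top2 := (PySem.List.min? b' (fun x => x)).getD 0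
      (top1, top2)
  else (0, 0)

-- ===== PORT B =====
-- `top1, top2 = sorted(b, reverse=R)[:2]`: the non-pair match arm is Python's ValueError on unpacking, outside Pre_.
def pvTake2 (xs : List Int) : Int × Int :=
  match PySem.List.slice xs none (some 2) with
  | [t1, t2] => (t1, t2)
  | _ => (0, 0)

def Top2Number_alt (b : List Int) (mode : String) : Int × Int :=
  if mode == "max" then
    if b.all (fun i => decide (i < 0)) then
      pvTake2 (PySem.List.sorted b (fun x => x) false)
    else
      pvTake2 (PySem.List.sorted b (fun x => x) true)
  else if mode == "min" then
    if b.all (fun i => decide (i < 0)) then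
      pvTake2 (PySem.List.sorted b (fun x => x) true)
    else
      pvTake2 (PySem.List.sorted b (fun x => x) false)
  else (0, 0)

-- ===== PRECONDITION & SPEC =====
-- A raises unless the mode is 'max' or 'min' (UnboundLocalError) and b has at least two elements (ValueError).
def Pre_Top2Number (b : List Int) (mode : String) : Prop :=
  (mode = "max" ∨ mode = "min") ∧ 2 ≤ b.length
instance (b : List Int) (mode : String) : Decidable (Pre_Top2Number b mode) := by unfold Pre_Top2Number; infer_instance

def pvWitness_Top2Number : List Int × String := ([3, 1], "max")

def Spec_Top2Number (b : List Int) (mode : String) (out : Int × Int) : Prop := out = Top2Number_alt b mode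
instance (b : List Int) (mode : String) (out : Int × Int) : Decidable (Spec_Top2Number b mode out) := by unfold Spec_Top2Number; infer_instance

-- ===== CLAIM (what is proved, stated in full; the proofs are below) =====
def Claim_equal_Top2Number : Prop := ∀ (b : List Int) (mode : String), Dom_Top2Number b mode → Pre_Top2Number b mode → Spec_Top2Number b mode (Top2Number b mode)

-- ===== LEMMAS AND PROOFS =====

-- min(b) is the head of sorted(b), and min of b with its first min removed is the second sorted element.
lemma pair_asc (b : List Int) (m t0 : Int) (t' : List Int)
    (h : PySem.List.sorted b (fun x => x) false = m :: t0 :: t') :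
    PySem.List.min? b (fun x => x) = some m ∧
    PySem.List.remove? b m = some (b.erase m) ∧
    PySem.List.min? (b.erase m) (fun x => x) = some t0 := by
  have hperm : (m :: t0 :: t').Perm b := by
    have := PySem.List.sorted_perm b (fun x => x) false
    rwa [h] at this
  have hpw : (m :: t0 :: t').Pairwise (fun a c : Int => a ≤ c) := by
    have := PySem.List.sorted_pairwise b (fun x => x)
    rwa [h] at this
  have hmb : m ∈ b := hperm.subset (List.mem_cons_self ..)
  have hhead := PySem.List.key_head_sorted_le b (fun x => x) h
  have hmin1 : PySem.List.min? b (fun x => x) = some m := by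
    cases hmin : PySem.List.min? b (fun x => x) with
    | none =>
      rw [PySem.List.min?_eq_none_iff] at hmin
      simp [hmin] at hmb
    | some y =>
      have hy_mem := PySem.List.min?_mem hmin
      have hy_min := PySem.List.min?_isMin hmin
      have h1 : m ≤ y := hhead y hy_mem
      have h2 : y ≤ m := hy_min m hmb
      simp [le_antisymm h2 h1]
  have hrem := PySem.List.remove?_eq_some_erase b m hmb
  have hpe : (t0 :: t').Perm (b.erase m) := by
    have := hperm.erase m
    simpa using this
  have ht0 : t0 ∈ b.erase m := hpe.subset (List.mem_cons_self ..)
  have ht0min : ∀ z ∈ b.erase m, t0 ≤ z := by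
    intro z hz
    have hz' : z ∈ t0 :: t' := hpe.mem_iff.mpr hz
    rcases List.mem_cons.mp hz' with rfl | hz''
    · exact le_refl _
    · exact (List.pairwise_cons.mp (List.pairwise_cons.mp hpw).2).1 z hz''
  refine ⟨hmin1, hrem, ?_⟩
  cases hmin : PySem.List.min? (b.erase m) (fun x => x) with
  | none =>
    rw [PySem.List.min?_eq_none_iff] at hmin
    simp [hmin] at ht0
  | some y =>
    have hy_mem := PySem.List.min?_mem hmin
    have hy_min := PySem.List.min?_isMin hmin
    have h1 : t0 ≤ y := ht0min y hy_mem
    have h2 : y ≤ t0 := hy_min t0 ht0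
    simp [le_antisymm h2 h1]

-- the reverse-sorted twin for the two-maxima branches
lemma pair_desc (b : List Int) (m t0 : Int) (t' : List Int)
    (h : PySem.List.sorted b (fun x => x) true = m :: t0 :: t') :
    PySem.List.max? b (fun x => x) = some m ∧
    PySem.List.remove? b m = some (b.erase m) ∧
    PySem.List.max? (b.erase m) (fun x => x) = some t0 := by
  have hperm : (m :: t0 :: t').Perm b := by
    have := PySem.List.sorted_perm b (fun x => x) true
    rwa [h] at this
  have hpw : (m :: t0 :: t').Pairwise (fun a c : Int => c ≤ a) := by
    have := PySem.List.sorted_pairwise_rev b (fun x => x)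
    rwa [h] at this
  have hmb : m ∈ b := hperm.subset (List.mem_cons_self ..)
  have hhead := PySem.List.key_head_sorted_rev_ge b (fun x => x) h
  have hmax1 : PySem.List.max? b (fun x => x) = some m := by
    cases hmax : PySem.List.max? b (fun x => x) with
    | none =>
      rw [PySem.List.max?_eq_none_iff] at hmax
      simp [hmax] at hmb
    | some y =>
      have hy_mem := PySem.List.max?_mem hmax
      have hy_max := PySem.List.max?_isMax hmax
      have h1 : y ≤ m := hhead y hy_mem
      have h2 : m ≤ y := hy_max m hmb
      simp [le_antisymm h1 h2]
  have hrem := PySem.List.remove?_eq_some_erase b m hmb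
  have hpe : (t0 :: t').Perm (b.erase m) := by
    have := hperm.erase m
    simpa using this
  have ht0 : t0 ∈ b.erase m := hpe.subset (List.mem_cons_self ..)
  have ht0max : ∀ z ∈ b.erase m, z ≤ t0 := by
    intro z hz
    have hz' : z ∈ t0 :: t' := hpe.mem_iff.mpr hz
    rcases List.mem_cons.mp hz' with rfl | hz''
    · exact le_refl _
    · exact (List.pairwise_cons.mp (List.pairwise_cons.mp hpw).2).1 z hz''
  refine ⟨hmax1, hrem, ?_⟩
  cases hmax : PySem.List.max? (b.erase m) (fun x => x) with
  | none =>
    rw [PySem.List.max?_eq_none_iff] at hmax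
    simp [hmax] at ht0
  | some y =>
    have hy_mem := PySem.List.max?_mem hmax
    have hy_max := PySem.List.max?_isMax hmax
    have h1 : y ≤ t0 := ht0max y hy_mem
    have h2 : t0 ≤ y := hy_max t0 ht0
    simp [le_antisymm h1 h2]

lemma take2_cons_cons (m t0 : Int) (t' : List Int) :
    pvTake2 (m :: t0 :: t') = (m, t0) := by
  have : PySem.List.slice (m :: t0 :: t') none (some 2) = [m, t0] := by
    rw [PySem.List.slice_to (m :: t0 :: t') (by norm_num : (0:Int) ≤ 2)]
    rfl
  simp [pvTake2, this]

lemma sorted_two (b : List Int) (r : Bool) (hlen : 2 ≤ b.length) :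
    ∃ m t0 t', PySem.List.sorted b (fun x => x) r = m :: t0 :: t' := by
  have hl : 2 ≤ (PySem.List.sorted b (fun x => x) r).length := by
    rw [PySem.List.length_sorted]; exact hlen
  match hs : PySem.List.sorted b (fun x => x) r with
  | [] => rw [hs] at hl; simp at hl
  | [x] => rw [hs] at hl; simp at hl
  | m :: t0 :: t' => exact ⟨m, t0, t', rfl⟩

-- one branch pair: A's ascending min/remove/min equals B's sorted-take-2
lemma branch_asc (b : List Int) (hlen : 2 ≤ b.length) :
    ((PySem.List.min? b (fun x => x)).getD 0,
     (PySem.List.min? ((PySem.List.remove? b ((PySem.List.min? b (fun x => x)).getD 0)).getD []) (fun x => x)).getD 0)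
    = pvTake2 (PySem.List.sorted b (fun x => x) false) := by
  obtain ⟨m, t0, t', hs⟩ := sorted_two b false hlen
  obtain ⟨h1, h2, h3⟩ := pair_asc b m t0 t' hs
  rw [hs, take2_cons_cons, h1]
  simp only [Option.getD_some]
  rw [h2]
  simp only [Option.getD_some]
  rw [h3]
  rfl

lemma branch_desc (b : List Int) (hlen : 2 ≤ b.length) :
    ((PySem.List.max? b (fun x => x)).getD 0,
     (PySem.List.max? ((PySem.List.remove? b ((PySem.List.max? b (fun x => x)).getD 0)).getD []) (fun x => x)).getD 0)
    = pvTake2 (PySem.List.sorted b (fun x => x) true) := by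
  obtain ⟨m, t0, t', hs⟩ := sorted_two b true hlen
  obtain ⟨h1, h2, h3⟩ := pair_desc b m t0 t' hs
  rw [hs, take2_cons_cons, h1]
  simp only [Option.getD_some]
  rw [h2]
  simp only [Option.getD_some]
  rw [h3]
  rfl

-- ===== VERDICT (by name: the statement is the Claim_ definition above) =====
theorem Top2Number_spec : Claim_equal_Top2Number := by
  intro b mode _ hpre
  obtain ⟨hm, hlen⟩ := hpre
  unfold Spec_Top2Number Top2Number Top2Number_alt
  rcases hm with rfl | rfl
  · simp only [beq_self_eq_true, if_true]
    by_cases hneg : b.all (fun i => decide (i < 0)) = true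
    · simp only [hneg, if_true]
      exact branch_asc b hlen
    · simp only [hneg, if_false, Bool.false_eq_true]
      exact branch_desc b hlen
  · have : (("min" : String) == "max") = false := by decide
    simp only [this, beq_self_eq_true, if_true, if_false, Bool.false_eq_true]
    by_cases hneg : b.all (fun i => decide (i < 0)) = true
    · simp only [hneg, if_true]
      exact branch_desc b hlen
    · simp only [hneg, if_false, Bool.false_eq_true]
      exact branch_asc b hlen
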